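-- pv_equiv track=rewrite | github.com/Garylauchina/openclaw-neo4j-memory | meditation-deployment/incremental_processing.py | _find_affected_nodes
-- ===== SOURCE A (Python) =====
-- from typing import Dict, List, Optional, Set
--
-- def _find_affected_nodes(changed_node_ids: List[str], edges: List[Dict]) -> List[Dict]:
--     """查找受变化影响的节点（连接到变化节点的节点）"""
--     # 构建邻接表
--     adjacency = {}
--     for edge in edges:
--         source = edge['source']
--         target = edge['target']
--
--         if source not in adjacency:
--             adjacency[source] = []
--         if target not in adjacency:
--             adjacency[target] = []
--
--         adjacency[source].append(target)
--         adjacency[target].append(source)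
--
--     # 查找受影响的节点（变化节点的邻居）
--     affected_ids = set()
--     for node_id in changed_node_ids:
--         if node_id in adjacency:
--             affected_ids.update(adjacency[node_id])
--
--     # 排除变化节点本身
--     affected_ids -= set(changed_node_ids)
--
--     # 返回受影响节点的信息（需要从图中获取详细信息）
--     # 这里只返回ID，详细信息在后续处理时获取
--     return [{'id': aid, 'reason': 'connected_to_changed'} for aid in affected_ids]
-- ===== SOURCE B (Python) =====
-- def _find_affected_nodes(changed_node_ids, edges):
--     """Neighbors of changed nodes, excluding the changed nodes themselves."""
--     affected_ids = set()
--     for node_id in changed_node_ids: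
--         for edge in edges:
--             if edge['source'] == node_id:
--                 affected_ids.add(edge['target'])
--             if edge['target'] == node_id:
--                 affected_ids.add(edge['source'])
--     affected_ids -= set(changed_node_ids)
--     return [{'id': aid, 'reason': 'connected_to_changed'} for aid in affected_ids]
-- ===== Notes on version B (the rewrite author's own statement) =====
-- stated objective: simpler
-- what changed: B drops A's adjacency-dict construction entirely and finds each changed node's neighbors by scanning the edge list directly, keeping only the result set.
import Mathlib
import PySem

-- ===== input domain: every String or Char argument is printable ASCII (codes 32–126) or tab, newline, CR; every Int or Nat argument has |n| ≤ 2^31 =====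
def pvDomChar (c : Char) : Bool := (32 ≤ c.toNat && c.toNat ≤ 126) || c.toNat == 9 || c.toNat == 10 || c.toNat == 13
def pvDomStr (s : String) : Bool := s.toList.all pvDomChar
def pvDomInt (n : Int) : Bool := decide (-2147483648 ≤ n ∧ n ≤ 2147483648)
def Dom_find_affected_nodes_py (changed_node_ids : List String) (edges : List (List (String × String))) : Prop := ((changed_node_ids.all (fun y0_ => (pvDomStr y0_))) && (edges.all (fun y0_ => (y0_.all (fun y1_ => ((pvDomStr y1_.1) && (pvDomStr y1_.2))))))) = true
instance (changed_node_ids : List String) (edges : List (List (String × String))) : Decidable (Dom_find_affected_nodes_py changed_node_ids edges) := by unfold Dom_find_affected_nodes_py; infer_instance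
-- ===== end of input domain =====

-- B replaces A's adjacency-dict construction by a direct scan of the edge list per changed node (simpler; same return value).


-- edge['source'] / edge['target'] (first-match lookup; total via default, used only under Pre_ which guarantees the key is present)
def pvEdgeSrc (e : List (String × String)) : String := (PySem.Dict.mk e).getD "source" ""
def pvEdgeTgt (e : List (String × String)) : String := (PySem.Dict.mk e).getD "target" ""

-- ===== PORT A =====
-- one iteration of A's adjacency-building loop
def pvAdjStep (d : PySem.Dict String (List String)) (e : List (String × String)) : PySem.Dict String (List String) :=
  let source := pvEdgeSrc e
  let target := pvEdgeTgt e
  let d1 := if d.contains source then d else d.insert source []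
  let d2 := if d1.contains target then d1 else d1.insert target []
  let d3 := d2.insert source (d2.getD source [] ++ [target])
  d3.insert target (d3.getD target [] ++ [source])

def find_affected_nodes_py (changed_node_ids : List String) (edges : List (List (String × String))) : List (List (String × String)) :=
  let adjacency := edges.foldl pvAdjStep PySem.Dict.empty
  let affected_ids := changed_node_ids.foldl
    (fun s node_id => if adjacency.contains node_id then PySem.Set.update s (adjacency.getD node_id []) else s)
    PySem.Set.empty
  let affected_ids := PySem.Set.diff affected_ids (PySem.Set.ofList changed_node_ids)
  affected_ids.map (fun aid => [("id", aid), ("reason", "connected_to_changed")])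

-- ===== PORT B =====
def find_affected_nodes_py_alt (changed_node_ids : List String) (edges : List (List (String × String))) : List (List (String × String)) :=
  let affected_ids := changed_node_ids.foldl
    (fun s node_id => edges.foldl
      (fun s e =>
        let s1 := if pvEdgeSrc e == node_id then PySem.Set.add s (pvEdgeTgt e) else s
        if pvEdgeTgt e == node_id then PySem.Set.add s1 (pvEdgeSrc e) else s1)
      s)
    PySem.Set.empty
  (PySem.Set.diff affected_ids (PySem.Set.ofList changed_node_ids)).map
    (fun aid => [("id", aid), ("reason", "connected_to_changed")])

-- ===== PRECONDITION & SPEC =====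
-- Pre_ excludes exactly the inputs where Python A raises KeyError: an edge dict missing the key 'source' or 'target'.
def Pre_find_affected_nodes_py (changed_node_ids : List String) (edges : List (List (String × String))) : Prop :=
  edges.all (fun e => (PySem.Dict.mk e).contains "source" && (PySem.Dict.mk e).contains "target") = true
instance (changed_node_ids : List String) (edges : List (List (String × String))) : Decidable (Pre_find_affected_nodes_py changed_node_ids edges) := by unfold Pre_find_affected_nodes_py; infer_instance
def pvWitness_find_affected_nodes_py : List String × (List (List (String × String))) :=
  (["a"], [[("source", "a"), ("target", "b")]])

def Spec_find_affected_nodes_py (changed_node_ids : List String) (edges : List (List (String × String))) (out : List (List (String × String))) : Prop := out = find_affected_nodes_py_alt changed_node_ids edges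
instance (changed_node_ids : List String) (edges : List (List (String × String))) (out : List (List (String × String))) : Decidable (Spec_find_affected_nodes_py changed_node_ids edges out) := by unfold Spec_find_affected_nodes_py; infer_instance

-- ===== CLAIM (what is proved, stated in full; the proofs are below) =====
def Claim_equal_find_affected_nodes_py : Prop := ∀ (changed_node_ids : List String) (edges : List (List (String × String))), Dom_find_affected_nodes_py changed_node_ids edges → Pre_find_affected_nodes_py changed_node_ids edges → Spec_find_affected_nodes_py changed_node_ids edges (find_affected_nodes_py changed_node_ids edges)

-- ===== LEMMAS AND PROOFS =====

-- the neighbors that A's adjacency list records for c, in insertion order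
def pvNbrs (edges : List (List (String × String))) (c : String) : List String :=
  edges.flatMap (fun e =>
    (if pvEdgeSrc e == c then [pvEdgeTgt e] else []) ++ (if pvEdgeTgt e == c then [pvEdgeSrc e] else []))

theorem pvEnsure_getD (d : PySem.Dict String (List String)) (k k' : String) :
    ((if d.contains k then d else d.insert k ([] : List String)).getD k' []) = d.getD k' [] := by
  split
  · rfl
  · next h =>
    rw [PySem.Dict.getD_insert]
    split
    · next he =>
      subst he
      simp only [PySem.Dict.getD]
      rw [(PySem.Dict.get?_eq_none_iff_contains d k').2 (by simpa using h)]
      rfl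
    · rfl

theorem pvAdjStep_getD (d : PySem.Dict String (List String)) (e : List (String × String)) (c : String) :
    (pvAdjStep d e).getD c [] =
      d.getD c [] ++ ((if pvEdgeSrc e == c then [pvEdgeTgt e] else []) ++ (if pvEdgeTgt e == c then [pvEdgeSrc e] else [])) := by
  unfold pvAdjStep
  simp only [pvEnsure_getD, PySem.Dict.getD_insert, beq_iff_eq]
  by_cases h1 : c = pvEdgeTgt e <;> by_cases h2 : c = pvEdgeSrc e <;>
    by_cases h3 : pvEdgeTgt e = pvEdgeSrc e <;>
      simp_all [List.append_assoc, ne_comm]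

theorem pvAdj_getD (edges : List (List (String × String))) (d : PySem.Dict String (List String)) (c : String) :
    (edges.foldl pvAdjStep d).getD c [] = d.getD c [] ++ pvNbrs edges c := by
  induction edges generalizing d with
  | nil => simp [pvNbrs]
  | cons e es ih =>
    simp only [List.foldl_cons, ih, pvAdjStep_getD, pvNbrs, List.flatMap_cons, List.append_assoc]

theorem pvB_inner (edges : List (List (String × String))) (s : PySem.Set String) (c : String) :
    edges.foldl
      (fun s e =>
        let s1 := if pvEdgeSrc e == c then PySem.Set.add s (pvEdgeTgt e) else s
        if pvEdgeTgt e == c then PySem.Set.add s1 (pvEdgeSrc e) else s1) s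
    = PySem.Set.update s (pvNbrs edges c) := by
  induction edges generalizing s with
  | nil => rfl
  | cons e es ih =>
    simp only [List.foldl_cons, ih, pvNbrs, List.flatMap_cons, PySem.Set.update, List.foldl_append]
    congr 1
    by_cases hsc : pvEdgeSrc e == c <;> by_cases htc : pvEdgeTgt e == c <;>
      simp [hsc, htc, List.foldl]

theorem pvA_outer_step (edges : List (List (String × String))) (s : PySem.Set String) (c : String) :
    (if (edges.foldl pvAdjStep PySem.Dict.empty).contains c
      then PySem.Set.update s ((edges.foldl pvAdjStep PySem.Dict.empty).getD c []) else s)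
    = PySem.Set.update s (pvNbrs edges c) := by
  have hadj := pvAdj_getD edges PySem.Dict.empty c
  by_cases h : (edges.foldl pvAdjStep PySem.Dict.empty).contains c = true
  · simp only [h, if_true]
    rw [hadj]
    rfl
  · have h3 : (edges.foldl pvAdjStep PySem.Dict.empty).getD c [] = [] := by
      simp only [PySem.Dict.getD]
      rw [(PySem.Dict.get?_eq_none_iff_contains _ c).2 (by simpa using h)]
      rfl
    rw [h3] at hadj
    simp only [h]
    have hn : pvNbrs edges c = [] := by
      have : ([] : List String) = pvNbrs edges c := by simpa using hadj
      exact this.symm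
    rw [hn]
    rfl

-- ===== VERDICT (by name: the statement is the Claim_ definition above) =====
theorem find_affected_nodes_py_spec : Claim_equal_find_affected_nodes_py := by
  intro changed edges _ _
  unfold Spec_find_affected_nodes_py find_affected_nodes_py find_affected_nodes_py_alt
  simp only [pvB_inner]
  have hfold : changed.foldl
      (fun s node_id => if (edges.foldl pvAdjStep PySem.Dict.empty).contains node_id
        then PySem.Set.update s ((edges.foldl pvAdjStep PySem.Dict.empty).getD node_id []) else s)
      PySem.Set.empty
    = changed.foldl (fun s node_id => PySem.Set.update s (pvNbrs edges node_id)) PySem.Set.empty := by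
    congr 1
    funext s c
    exact pvA_outer_step edges s c
  rw [hfold]
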